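-- pv_equiv track=rewrite | github.com/le-flav-b/king-of-chess-duo | main.py | find_3_repetitions
-- ===== SOURCE A (Python) =====
-- def find_3_repetitions(a_list):
--     a_list_copy = a_list.copy()
--     if len(a_list_copy) >= 12:
--         while len(a_list_copy) % 6 != 0:
--             del a_list_copy[0]
--         for i in range(len(a_list_copy) // 6 - 1):
--             end_of_list = a_list_copy[len(a_list_copy) - (12 + 6 * i):]
--             if end_of_list[:4 + 2 * i] == end_of_list[4 + 2 * i:8 + 4 * i] == end_of_list[8 + 4 * i:]:
--                 return True
--     return False
-- ===== SOURCE B (Python) =====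
-- def find_3_repetitions(a_list):
--     # Z-function of the reversed list gives, for each shift k, the length of the
--     # longest prefix of the reversed list matching itself shifted by k; three equal
--     # tail blocks of size k exist iff that length is >= 2*k.
--     n = len(a_list)
--     if n < 12:
--         return False
--     s = a_list[::-1]
--     z = [0] * n
--     z[0] = n
--     l = r = 0
--     for k in range(1, n):
--         v = min(r - k, z[k - l]) if k < r else 0
--         while k + v < n and s[v] == s[k + v]:
--             v += 1
--         z[k] = v
--         if r < k + v:
--             l, r = k, k + v
--     bound = 6 * (n // 6)
--     k = 4
--     while 3 * k <= bound:
--         if z[k] >= 2 * k: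
--             return True
--         k += 2
--     return False
-- ===== Notes on version B (the rewrite author's own statement) =====
-- stated objective: faster
-- what changed: B reverses the list and computes its Z-function (longest match with itself at each shift) in one linear pass with the standard (l,r)-window algorithm, then answers each candidate block size by a single O(1) table lookup z[k] >= 2k, instead of A's per-size tail-slice comparisons.
import Mathlib
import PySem

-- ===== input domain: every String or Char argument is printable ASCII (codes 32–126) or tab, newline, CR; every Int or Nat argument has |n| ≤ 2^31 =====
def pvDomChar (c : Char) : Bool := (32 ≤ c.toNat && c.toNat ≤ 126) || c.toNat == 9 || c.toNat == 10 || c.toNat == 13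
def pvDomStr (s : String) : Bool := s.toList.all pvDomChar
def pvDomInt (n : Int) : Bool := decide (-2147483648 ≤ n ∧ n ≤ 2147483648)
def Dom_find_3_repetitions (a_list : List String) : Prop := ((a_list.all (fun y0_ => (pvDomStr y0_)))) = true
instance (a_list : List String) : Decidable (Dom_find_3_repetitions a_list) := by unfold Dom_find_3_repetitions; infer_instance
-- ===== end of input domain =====

-- B replaces A's quadratic per-block-size tail-slice comparisons by a single linear Z-function
-- pass over the reversed list, then reads off each candidate block size in O(1); objective: faster.

-- ===== PORT A =====
-- while len(a_list_copy) % 6 != 0: del a_list_copy[0]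
def pvTrim6 : List String → List String
  | [] => []
  | x :: t =>
    if PySem.Int.mod (((x :: t).length : Int)) 6 ≠ 0 then pvTrim6 t else x :: t

def find_3_repetitions (a_list : List String) : Bool :=
  let a_list_copy := a_list
  if 12 ≤ a_list_copy.length then
    let t := pvTrim6 a_list_copy
    -- for i in range(len//6 - 1): early 'return True' = any
    (PySem.List.pyRange 0 (PySem.Int.floordiv ((t.length : Int)) 6 - 1)).any (fun i =>
      let eol := PySem.List.slice t (some ((t.length : Int) - (12 + 6 * i))) none
      (PySem.List.slice eol none (some (4 + 2 * i)) ==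
        PySem.List.slice eol (some (4 + 2 * i)) (some (8 + 4 * i))) &&
      (PySem.List.slice eol (some (4 + 2 * i)) (some (8 + 4 * i)) ==
        PySem.List.slice eol (some (8 + 4 * i)) none))
  else false

-- ===== PORT B =====
-- while k + v < n and s[v] == s[k + v]: v += 1
def pvExtend (s : List String) (n k v : ℕ) : ℕ :=
  if h : k + v < n ∧ s.getD v "" = s.getD (k + v) "" then pvExtend s n k (v + 1) else v
termination_by n - (k + v)
decreasing_by omega

-- one iteration of 'for k in range(1, n)' over the state (z, l, r)
def pvZStep (s : List String) (n : ℕ) (st : List ℕ × ℕ × ℕ) (k : ℕ) : List ℕ × ℕ × ℕ :=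
  let z := st.1
  let l := st.2.1
  let r := st.2.2
  let v0 := if k < r then min (r - k) (z.getD (k - l) 0) else 0
  let v := pvExtend s n k v0
  let z' := z.set k v
  if r < k + v then (z', k, k + v) else (z', l, r)

-- k = 4; while 3 * k <= bound: if z[k] >= 2 * k: return True; k += 2
def pvScan (z : List ℕ) (bound k : ℕ) : Bool :=
  if 3 * k ≤ bound then
    if 2 * k ≤ z.getD k 0 then true else pvScan z bound (k + 2)
  else false
termination_by bound + 1 - k
decreasing_by omega

def find_3_repetitions_alt (a_list : List String) : Bool :=
  let n := a_list.length
  if n < 12 then false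
  else
    let s := a_list.reverse
    let z0 := (List.replicate n 0).set 0 n
    let zlr := (List.range' 1 (n - 1)).foldl (pvZStep s n) (z0, 0, 0)
    pvScan zlr.1 (6 * (n / 6)) 4

-- ===== PRECONDITION & SPEC =====
def Spec_find_3_repetitions (a_list : List String) (out : Bool) : Prop := out = find_3_repetitions_alt a_list
instance (a_list : List String) (out : Bool) : Decidable (Spec_find_3_repetitions a_list out) := by unfold Spec_find_3_repetitions; infer_instance

-- ===== CLAIM (what is proved, stated in full; the proofs are below) =====
def Claim_equal_find_3_repetitions : Prop := ∀ (a_list : List String), Dom_find_3_repetitions a_list → Spec_find_3_repetitions a_list (find_3_repetitions a_list)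

-- ===== LEMMAS AND PROOFS =====

-- the specification of the z-values: length of the longest common prefix
def pvLcp : List String → List String → ℕ
  | a :: as, b :: bs => if a = b then pvLcp as bs + 1 else 0
  | _, _ => 0

lemma pvLcp_le_left : ∀ (a b : List String), pvLcp a b ≤ a.length := by
  intro a
  induction a with
  | nil => intro b; cases b <;> simp [pvLcp]
  | cons x xs ih =>
    intro b
    cases b with
    | nil => simp [pvLcp]
    | cons y ys =>
      simp only [pvLcp, List.length_cons]
      split_ifs
      · have := ih ys; omega
      · omega

lemma pvLcp_le_right : ∀ (a b : List String), pvLcp a b ≤ b.length := by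
  intro a
  induction a with
  | nil => intro b; cases b <;> simp [pvLcp]
  | cons x xs ih =>
    intro b
    cases b with
    | nil => simp [pvLcp]
    | cons y ys =>
      simp only [pvLcp, List.length_cons]
      split_ifs
      · have := ih ys; omega
      · omega

lemma pvLcp_self : ∀ (a : List String), pvLcp a a = a.length := by
  intro a
  induction a with
  | nil => simp [pvLcp]
  | cons x xs ih => simp [pvLcp, ih]

lemma pvLcp_getD : ∀ (a b : List String) (i : ℕ), i < pvLcp a b →
    a.getD i "" = b.getD i "" := by
  intro a
  induction a with
  | nil => intro b i h; cases b <;> simp [pvLcp] at h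
  | cons x xs ih =>
    intro b i h
    cases b with
    | nil => simp [pvLcp] at h
    | cons y ys =>
      simp only [pvLcp] at h
      split_ifs at h with hxy
      · cases i with
        | zero => simpa using hxy
        | succ i' =>
          simp only [List.getD_cons_succ]
          exact ih ys i' (by omega)
      · omega

lemma pvLcp_stop : ∀ (a b : List String), pvLcp a b < a.length → pvLcp a b < b.length →
    a.getD (pvLcp a b) "" ≠ b.getD (pvLcp a b) "" := by
  intro a
  induction a with
  | nil => intro b h1 _; simp at h1
  | cons x xs ih =>
    intro b h1 h2
    cases b with
    | nil => simp at h2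
    | cons y ys =>
      simp only [pvLcp] at h1 h2 ⊢
      split_ifs at h1 h2 ⊢ with hxy
      · simp only [List.getD_cons_succ]
        exact ih ys (by simpa using h1) (by simpa using h2)
      · simpa using hxy

lemma le_pvLcp : ∀ (m : ℕ) (a b : List String), m ≤ a.length → m ≤ b.length →
    (∀ i, i < m → a.getD i "" = b.getD i "") → m ≤ pvLcp a b := by
  intro m
  induction m with
  | zero => intro a b _ _ _; omega
  | succ m' ih =>
    intro a b h1 h2 h
    cases a with
    | nil => simp at h1
    | cons x xs =>
      cases b with
      | nil => simp at h2
      | cons y ys =>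
        have hxy : x = y := by simpa using h 0 (by omega)
        have hc : pvLcp (x :: xs) (y :: ys) = pvLcp xs ys + 1 := by
          simp [pvLcp, hxy]
        rw [hc]
        have : m' ≤ pvLcp xs ys := by
          refine ih xs ys (by simpa using h1) (by simpa using h2) ?_
          intro i hi
          have := h (i + 1) (by omega)
          simpa using this
        omega

lemma le_pvLcp_iff_take : ∀ (m : ℕ) (a b : List String),
    (m ≤ pvLcp a b ↔ m ≤ a.length ∧ m ≤ b.length ∧ a.take m = b.take m) := by
  intro m a b
  constructor
  · intro h
    refine ⟨le_trans h (pvLcp_le_left a b), le_trans h (pvLcp_le_right a b), ?_⟩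
    apply List.ext_getElem?
    intro i
    by_cases hi : i < m
    · have hia : i < a.length := by have := pvLcp_le_left a b; omega
      have hib : i < b.length := by have := pvLcp_le_right a b; omega
      rw [List.getElem?_take, List.getElem?_take]
      simp only [hi, if_pos]
      have := pvLcp_getD a b i (by omega)
      simp only [List.getD_eq_getElem?_getD, List.getElem?_eq_getElem hia,
        List.getElem?_eq_getElem hib, Option.getD_some] at this
      simp [List.getElem?_eq_getElem hia, List.getElem?_eq_getElem hib, this]
    · rw [List.getElem?_take, List.getElem?_take]
      simp [hi]
  · rintro ⟨h1, h2, h3⟩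
    refine le_pvLcp m a b h1 h2 ?_
    intro i hi
    have : (a.take m).getD i "" = (b.take m).getD i "" := by rw [h3]
    simpa [List.getD_eq_getElem?_getD, List.getElem?_take, hi] using this

lemma getD_drop' (l : List String) (i j : ℕ) (d : String) :
    (l.drop i).getD j d = l.getD (i + j) d := by
  simp [List.getD_eq_getElem?_getD, List.getElem?_drop]

-- the while loop computes exactly the longest-common-prefix length, starting from any sound lower bound
lemma pvExtend_fix (s : List String) (n k : ℕ) (hn : s.length = n) (hk : 1 ≤ k) :
    pvExtend s n k (pvLcp s (s.drop k)) = pvLcp s (s.drop k) := by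
  set L := pvLcp s (s.drop k) with hL
  rw [pvExtend]
  rw [dif_neg]
  rintro ⟨h1, h2⟩
  have hdl : (s.drop k).length = n - k := by simp [hn]
  have hLa : L < s.length := by omega
  have hLb : L < (s.drop k).length := by omega
  have := pvLcp_stop s (s.drop k) hLa hLb
  rw [getD_drop'] at this
  exact this h2

lemma pvExtend_eq (s : List String) (n k : ℕ) (hn : s.length = n) (hk : 1 ≤ k) :
    ∀ (fuel v : ℕ), pvLcp s (s.drop k) - v ≤ fuel → v ≤ pvLcp s (s.drop k) →
      pvExtend s n k v = pvLcp s (s.drop k) := by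
  set L := pvLcp s (s.drop k) with hL
  intro fuel
  induction fuel with
  | zero =>
    intro v h1 h2
    have : v = L := by omega
    rw [this]
    exact pvExtend_fix s n k hn hk
  | succ f ih =>
    intro v h1 h2
    by_cases hv : v = L
    · rw [hv]; exact pvExtend_fix s n k hn hk
    · have hvL : v < L := by omega
      have hdl : (s.drop k).length = n - k := by simp [hn]
      have hLb : L ≤ n - k := by have := pvLcp_le_right s (s.drop k); omega
      have hkv : k + v < n := by omega
      have hch : s.getD v "" = s.getD (k + v) "" := by
        have := pvLcp_getD s (s.drop k) v hvL
        rwa [getD_drop'] at this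
      rw [pvExtend, dif_pos ⟨hkv, hch⟩]
      exact ih (v + 1) (by omega) (by omega)

-- loop invariant for the Z-pass: entries below k are correct, the (l, r) window is sound
def ZInv (s : List String) (n k : ℕ) (st : List ℕ × ℕ × ℕ) : Prop :=
  st.1.length = n ∧
  (∀ j, j < n → st.1.getD j 0 = if j < k then pvLcp s (s.drop j) else 0) ∧
  st.2.1 < k ∧ st.2.1 ≤ st.2.2 ∧ st.2.2 ≤ n ∧
  st.2.2 - st.2.1 ≤ pvLcp s (s.drop st.2.1)

lemma ZInv_step (s : List String) (n k : ℕ) (st : List ℕ × ℕ × ℕ)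
    (hn : s.length = n) (hk1 : 1 ≤ k) (hkn : k < n) (h : ZInv s n k st) :
    ZInv s n (k + 1) (pvZStep s n st k) := by
  obtain ⟨z, l, r⟩ := st
  obtain ⟨hlen, hz, hlk, hlr, hrn, hwin⟩ := h
  simp only at hlen hz hlk hlr hrn hwin
  set L := pvLcp s (s.drop k) with hLdef
  have hdl : (s.drop k).length = n - k := by simp [hn]
  have hLn : L ≤ n - k := by have := pvLcp_le_right s (s.drop k); omega
  -- the starting value is a sound lower bound
  have hv0 : (if k < r then min (r - k) (z.getD (k - l) 0) else 0) ≤ L := by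
    split_ifs with hkr
    · by_cases hl0 : l = 0
      · subst hl0
        have hz0 : z.getD k 0 = 0 := by
          have := hz k hkn
          simpa [lt_irrefl] using this
        simp only [Nat.sub_zero, hz0]
        omega
      · have hkl : k - l < k := by omega
        have hzval : z.getD (k - l) 0 = pvLcp s (s.drop (k - l)) := by
          have := hz (k - l) (by omega)
          rwa [if_pos hkl] at this
        rw [hzval]
        refine le_pvLcp _ s (s.drop k) (by omega) (by omega) ?_
        intro i hi
        have hi1 : i < r - k := by omega
        have hi2 : i < pvLcp s (s.drop (k - l)) := by omega
        have e1 : s.getD i "" = s.getD (k - l + i) "" := by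
          have := pvLcp_getD s (s.drop (k - l)) i hi2
          rwa [getD_drop'] at this
        have e2 : s.getD (k - l + i) "" = s.getD (k + i) "" := by
          have hj : k - l + i < r - l := by omega
          have := pvLcp_getD s (s.drop l) (k - l + i) (by omega)
          rw [getD_drop'] at this
          have harith : l + (k - l + i) = k + i := by omega
          rwa [harith] at this
        rw [getD_drop', e1, e2]
    · omega
  have hvL : pvExtend s n k (if k < r then min (r - k) (z.getD (k - l) 0) else 0) = L :=
    pvExtend_eq s n k hn hk1 L _ (by omega) hv0
  have hzset : ∀ j, j < n →
      (z.set k L).getD j 0 = if j < k + 1 then pvLcp s (s.drop j) else 0 := by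
    intro j hj
    by_cases hjk : j = k
    · subst hjk
      rw [List.getD_eq_getElem?_getD, List.getElem?_set_self (by omega)]
      simp [hLdef, (by omega : j < j + 1)]
    · rw [List.getD_eq_getElem?_getD, List.getElem?_set_ne (by omega : k ≠ j),
        ← List.getD_eq_getElem?_getD]
      rw [hz j hj]
      congr 1
      simp only [eq_iff_iff]
      omega
  simp only [pvZStep, hvL]
  split_ifs with hupd
  · refine ⟨by simp [hlen], hzset, ?_, ?_, ?_, ?_⟩
    · show k < k + 1
      omega
    · show k ≤ k + L
      omega
    · show k + L ≤ n
      omega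
    · show k + L - k ≤ pvLcp s (s.drop k)
      rw [← hLdef]
      omega
  · refine ⟨by simp [hlen], hzset, ?_, ?_, ?_, ?_⟩
    · show l < k + 1
      omega
    · exact hlr
    · exact hrn
    · exact hwin

lemma ZInv_fold (s : List String) (n : ℕ) (hn : s.length = n) (hn1 : 1 ≤ n) :
    ∀ m, 1 + m ≤ n →
      ZInv s n (1 + m)
        ((List.range' 1 m).foldl (pvZStep s n) ((List.replicate n 0).set 0 n, 0, 0)) := by
  intro m
  induction m with
  | zero =>
    intro _
    simp only [List.range'_zero, List.foldl_nil]
    refine ⟨by simp, ?_, ?_, ?_, ?_, ?_⟩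
    · intro j hj
      by_cases hj0 : j = 0
      · subst hj0
        rw [List.getD_eq_getElem?_getD, List.getElem?_set_self (by simpa using hn1)]
        simp [pvLcp_self, hn]
      · have hz0 : ((List.replicate n 0).set 0 n).getD j 0 = 0 := by
          rw [List.getD_eq_getElem?_getD, List.getElem?_set_ne (by omega : 0 ≠ j)]
          simp [hj]
        rw [hz0, if_neg (by omega : ¬ j < 1 + 0)]
    · show (0 : ℕ) < 1 + 0
      omega
    · exact le_refl 0
    · show (0 : ℕ) ≤ n
      omega
    · show (0 : ℕ) - 0 ≤ pvLcp s (s.drop 0)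
      simp
  | succ m ih =>
    intro hm
    rw [List.range'_concat, List.foldl_append]
    simp only [List.foldl_cons, List.foldl_nil]
    have := ZInv_step s n (1 + m) _ hn (by omega) (by omega) (ih (by omega))
    simpa [(by omega : 1 + (m + 1) = 1 + m + 1)] using this

-- the candidate-size scan is an existential over block sizes 4, 6, 8, …
lemma pvScan_iff (z : List ℕ) (bound : ℕ) : ∀ k,
    (pvScan z bound k = true ↔
      ∃ j : ℕ, 3 * (k + 2 * j) ≤ bound ∧ 2 * (k + 2 * j) ≤ z.getD (k + 2 * j) 0) := by
  intro k
  induction k using pvScan.induct (z := z) (bound := bound) with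
  | case1 k h hc =>
    rw [pvScan, if_pos h, if_pos hc]
    exact ⟨fun _ => ⟨0, by simpa using ⟨h, hc⟩⟩, fun _ => rfl⟩
  | case2 k h hc ih =>
    rw [pvScan, if_pos h, if_neg hc]
    rw [ih]
    constructor
    · rintro ⟨j, hj, he⟩
      exact ⟨j + 1, by omega, by convert he using 2 <;> omega⟩
    · rintro ⟨j, hj, he⟩
      cases j with
      | zero => exact absurd (by simpa using he) hc
      | succ j' => exact ⟨j', by omega, by convert he using 2 <;> omega⟩
  | case3 k h =>
    rw [pvScan, if_neg h]
    simp only [Bool.false_eq_true, false_iff]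
    rintro ⟨j, hj, -⟩
    omega

-- B characterised: some block size 4 + 2j fits the trimmed bound and the reversed list
-- matches itself shifted by that size on a doubled window
lemma alt_iff (l : List String) :
    (find_3_repetitions_alt l = true ↔
      ∃ j : ℕ, 12 + 6 * j ≤ 6 * (l.length / 6) ∧
        2 * (4 + 2 * j) ≤ pvLcp l.reverse (l.reverse.drop (4 + 2 * j))) := by
  simp only [find_3_repetitions_alt]
  set n := l.length with hn
  by_cases h12 : n < 12
  · rw [if_pos h12]
    simp only [Bool.false_eq_true, false_iff]
    rintro ⟨j, hj, -⟩
    have : 6 * (n / 6) ≤ n := by omega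
    omega
  · rw [if_neg h12]
    have hinv := ZInv_fold l.reverse n (by simp [hn]) (by omega) (n - 1) (by omega)
    set st := (List.range' 1 (n - 1)).foldl (pvZStep l.reverse n)
      ((List.replicate n 0).set 0 n, 0, 0) with hst
    obtain ⟨-, hz, -, -, -, -⟩ := hinv
    rw [pvScan_iff]
    constructor
    · rintro ⟨j, hj, he⟩
      have hkn : 4 + 2 * j < n := by omega
      refine ⟨j, by omega, ?_⟩
      have := hz (4 + 2 * j) hkn
      rw [if_pos (by omega : 4 + 2 * j < 1 + (n - 1))] at this
      rwa [this] at he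
    · rintro ⟨j, hj, he⟩
      have hkn : 4 + 2 * j < n := by omega
      refine ⟨j, by omega, ?_⟩
      have := hz (4 + 2 * j) hkn
      rw [if_pos (by omega : 4 + 2 * j < 1 + (n - 1))] at this
      rwa [this]

-- doubled-window match on the reversed list ⟺ last 2k elements repeat with period k
lemma lcp_bridge (l : List String) (k : ℕ) (hk1 : 1 ≤ k) (hk3 : 3 * k ≤ l.length) :
    ((l.drop (l.length - 3 * k)).take (2 * k) = (l.drop (l.length - 3 * k)).drop k ↔
      2 * k ≤ pvLcp l.reverse (l.reverse.drop k)) := by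
  rw [le_pvLcp_iff_take]
  have ht1 : l.reverse.take (2 * k) = (l.drop (l.length - 2 * k)).reverse := by
    rw [List.take_reverse]
  have ht2 : l.reverse.drop k = (l.take (l.length - k)).reverse := by
    rw [List.drop_reverse]
  have hlt : (l.take (l.length - k)).length = l.length - k := by
    rw [List.length_take]
    omega
  have e1 : l.length - k - 2 * k = l.length - 3 * k := by omega
  have e2 : l.length - k - (l.length - 3 * k) = 2 * k := by omega
  have ht3 : (l.take (l.length - k)).reverse.take (2 * k) =
      ((l.drop (l.length - 3 * k)).take (2 * k)).reverse := by
    rw [List.take_reverse, hlt, List.drop_take, e1, e2]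
  have hd : (l.drop (l.length - 3 * k)).drop k = l.drop (l.length - 2 * k) := by
    rw [List.drop_drop]
    congr 1
    omega
  rw [ht2, ht3, ht1, hd]
  simp only [List.length_reverse, hlt]
  constructor
  · intro h
    exact ⟨by omega, by omega, congrArg List.reverse h.symm⟩
  · rintro ⟨-, -, h⟩
    exact (List.reverse_injective h).symm

-- A's front-trimming is dropping len % 6 elements.
lemma pvTrim6_eq_drop (l : List String) : pvTrim6 l = l.drop (l.length % 6) := by
  induction l with
  | nil => rfl
  | cons x t ih =>
    have hm : PySem.Int.mod (((x :: t).length : Int)) 6 = (((x :: t).length % 6 : Nat) : Int) := by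
      exact_mod_cast PySem.Int.mod_natCast (x :: t).length 6
    rw [pvTrim6, hm]
    split_ifs with h
    · have h' : (x :: t).length % 6 ≠ 0 := by exact_mod_cast h
      have h6 : (x :: t).length % 6 = t.length % 6 + 1 := by
        simp only [List.length_cons] at h' ⊢; omega
      rw [ih, h6, List.drop_succ_cons]
    · have h' : (x :: t).length % 6 = 0 := by
        have := not_not.mp (by exact_mod_cast h : ¬ ((((x :: t).length % 6 : Nat) : Int) ≠ 0))
        exact_mod_cast this
      rw [h', List.drop_zero]

-- three equal consecutive blocks ⟺ the doubled window repeats shifted by one block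
lemma three_blocks {α : Type} (E : List α) (k : ℕ) (hE : E.length = 3 * k) :
    (E.take (2 * k) = E.drop k) ↔
      (E.take k = (E.drop k).take k ∧ (E.drop k).take k = E.drop (2 * k)) := by
  have h1 : E.take (2 * k) = E.take k ++ (E.drop k).take k := by
    have h : 2 * k = k + k := by ring
    rw [h, List.take_add]
  have h2 : E.drop k = (E.drop k).take k ++ E.drop (2 * k) := by
    conv_lhs => rw [← List.take_append_drop k (E.drop k)]
    rw [List.drop_drop]
    ring_nf
  have hl1 : (E.take k).length = k := by
    rw [List.length_take]; omega
  have hl2 : ((E.drop k).take k).length = k := by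
    rw [List.length_take, List.length_drop]; omega
  constructor
  · intro h
    have h' : E.take k ++ (E.drop k).take k = (E.drop k).take k ++ E.drop (2 * k) := by
      rw [← h1, ← h2]; exact h
    exact List.append_inj h' (by rw [hl1, hl2])
  · rintro ⟨hA, hB⟩
    have h' : E.take k ++ (E.drop k).take k = (E.drop k).take k ++ E.drop (2 * k) := by
      rw [hA, hB]
    rw [h1, h', ← h2]

-- A's three-slice test at block size k = 4 + 2j on the trimmed list, reduced to the doubled window
lemma cond_equiv (l : List String) (j : ℕ) (hj : 12 + 6 * j ≤ 6 * (l.length / 6)) :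
    (PySem.List.slice (PySem.List.slice (l.drop (l.length % 6))
        (some (((l.drop (l.length % 6)).length : Int) - (12 + 6 * (j : ℤ)))) none) none (some (4 + 2 * (j : ℤ))) =
       PySem.List.slice (PySem.List.slice (l.drop (l.length % 6))
        (some (((l.drop (l.length % 6)).length : Int) - (12 + 6 * (j : ℤ)))) none) (some (4 + 2 * (j : ℤ))) (some (8 + 4 * (j : ℤ))) ∧
     PySem.List.slice (PySem.List.slice (l.drop (l.length % 6))
        (some (((l.drop (l.length % 6)).length : Int) - (12 + 6 * (j : ℤ)))) none) (some (4 + 2 * (j : ℤ))) (some (8 + 4 * (j : ℤ))) =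
       PySem.List.slice (PySem.List.slice (l.drop (l.length % 6))
        (some (((l.drop (l.length % 6)).length : Int) - (12 + 6 * (j : ℤ)))) none) (some (8 + 4 * (j : ℤ))) none)
    ↔ (l.drop (l.length - 3 * (4 + 2 * j))).take (2 * (4 + 2 * j)) =
        (l.drop (l.length - 3 * (4 + 2 * j))).drop (4 + 2 * j) := by
  set n := l.length with hn
  set q := n / 6 with hq
  set r := n % 6 with hr
  set k := 4 + 2 * j with hk
  have hqr : n = 6 * q + r ∧ r < 6 := by
    constructor
    · rw [hq, hr]; omega
    · rw [hr]; omega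
  have h3k : 3 * k ≤ 6 * q := by omega
  have hkn : 3 * k ≤ n := by omega
  have htlen : (l.drop r).length = 6 * q := by
    rw [List.length_drop]; omega
  -- eol = l.drop (n - 3*k)
  have heol : PySem.List.slice (l.drop r) (some (((l.drop r).length : Int) - (12 + 6 * (j : ℤ)))) none
      = l.drop (n - 3 * k) := by
    rw [htlen]
    have hcast : ((6 * q : ℕ) : ℤ) - (12 + 6 * (j : ℤ)) = ((6 * q - 3 * k : ℕ) : ℤ) := by
      push_cast; omega
    rw [hcast, PySem.List.slice_from _ (by positivity), Int.toNat_natCast, List.drop_drop]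
    congr 1; omega
  set E := l.drop (n - 3 * k) with hE
  have hElen : E.length = 3 * k := by
    rw [hE, List.length_drop]; omega
  -- the three inner slices
  have hs1 : PySem.List.slice E none (some (4 + 2 * (j : ℤ))) = E.take k := by
    rw [PySem.List.slice_to _ (by positivity)]
    congr 1
  have hs2 : PySem.List.slice E (some (4 + 2 * (j : ℤ))) (some (8 + 4 * (j : ℤ))) = (E.drop k).take k := by
    have h1 : (4 + 2 * (j : ℤ)) = ((k : ℕ) : ℤ) := by omega
    have h2 : (8 + 4 * (j : ℤ)) = ((2 * k : ℕ) : ℤ) := by push_cast; omega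
    rw [h1, h2, PySem.List.slice_natCast]
    congr 1; omega
  have hs3 : PySem.List.slice E (some (8 + 4 * (j : ℤ))) none = E.drop (2 * k) := by
    have h2 : (8 + 4 * (j : ℤ)) = ((2 * k : ℕ) : ℤ) := by push_cast; omega
    rw [h2, PySem.List.slice_from _ (by positivity), Int.toNat_natCast]
  rw [heol, hs1, hs2, hs3]
  exact (three_blocks E k hElen).symm

-- A characterised: the same existential over block sizes, in doubled-window form
lemma a_iff (l : List String) :
    (find_3_repetitions l = true ↔
      ∃ j : ℕ, 12 + 6 * j ≤ 6 * (l.length / 6) ∧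
        (l.drop (l.length - 3 * (4 + 2 * j))).take (2 * (4 + 2 * j)) =
          (l.drop (l.length - 3 * (4 + 2 * j))).drop (4 + 2 * j)) := by
  simp only [find_3_repetitions]
  by_cases h12 : 12 ≤ l.length
  · rw [if_pos h12, pvTrim6_eq_drop]
    have hfd2 : PySem.Int.floordiv (((l.drop (l.length % 6)).length : Int)) 6
        = ((l.length / 6 : ℕ) : ℤ) := by
      have : (l.drop (l.length % 6)).length = 6 * (l.length / 6) := by
        rw [List.length_drop]; omega
      rw [this]
      have h6 : (6 * (l.length / 6)) / 6 = l.length / 6 := by omega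
      calc PySem.Int.floordiv (((6 * (l.length / 6) : ℕ) : Int)) 6
          = (((6 * (l.length / 6)) / 6 : ℕ) : ℤ) := by
            exact_mod_cast PySem.Int.floordiv_natCast (6 * (l.length / 6)) 6
        _ = ((l.length / 6 : ℕ) : ℤ) := by rw [h6]
    rw [hfd2, List.any_eq_true]
    constructor
    · rintro ⟨i, hmem, hcond⟩
      rw [PySem.List.mem_pyRange_one] at hmem
      obtain ⟨hi0, hiM⟩ := hmem
      obtain ⟨j, rfl⟩ : ∃ j : ℕ, i = (j : ℤ) := ⟨i.toNat, (Int.toNat_of_nonneg hi0).symm⟩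
      have hj : 12 + 6 * j ≤ 6 * (l.length / 6) := by
        have := hiM
        push_cast at this
        omega
      simp only [Bool.and_eq_true, beq_iff_eq] at hcond
      exact ⟨j, hj, (cond_equiv l j hj).mp hcond⟩
    · rintro ⟨j, hj, hcond⟩
      refine ⟨(j : ℤ), ?_, ?_⟩
      · rw [PySem.List.mem_pyRange_one]
        constructor
        · positivity
        · push_cast; omega
      · simp only [Bool.and_eq_true, beq_iff_eq]
        exact (cond_equiv l j hj).mpr hcond
  · rw [if_neg h12]
    simp only [Bool.false_eq_true, false_iff]
    rintro ⟨j, hj, -⟩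
    have : 6 * (l.length / 6) ≤ l.length := by omega
    omega

-- ===== VERDICT (by name: the statement is the Claim_ definition above) =====
theorem find_3_repetitions_spec : Claim_equal_find_3_repetitions := by
  intro a_list _
  show find_3_repetitions a_list = find_3_repetitions_alt a_list
  rw [Bool.eq_iff_iff, a_iff, alt_iff]
  constructor
  · rintro ⟨j, hj, hcond⟩
    refine ⟨j, hj, ?_⟩
    rw [← lcp_bridge a_list (4 + 2 * j) (by omega) (by omega)]
    exact hcond
  · rintro ⟨j, hj, hcond⟩
    refine ⟨j, hj, ?_⟩
    rw [lcp_bridge a_list (4 + 2 * j) (by omega) (by omega)]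
    exact hcond
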